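-- pv_equiv track=rewrite | github.com/AnhTran1610/codility | count_bananas/count_bananas.py | solution
-- ===== SOURCE A (Python) =====
-- def solution(S):
--     A = 0
--     B = 0
--     N = 0
--
--     # Count the occurrences of 'A', 'B', and 'N'
--     for char in S:
--         if char == 'B':
--             B += 1
--         if char == 'A':
--             A += 1
--         if char == 'N':
--             N += 1
--
--     counter = 0
--
--     # Repeat the pattern 'BAN' as long as there are enough 'B', 'A', and 'N'
--     while B >= 1 and A >= 3 and N >= 2:
--         B -= 1
--         A -= 3
--         N -= 2
--         counter += 1
--
--     return counter
-- ===== SOURCE B (Python) =====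
-- def solution(S):
--     # Closed form: each 'BAN' pattern consumes 1 'B', 3 'A', 2 'N'.
--     return min(S.count('B'), S.count('A') // 3, S.count('N') // 2)
-- ===== Notes on version B (the rewrite author's own statement) =====
-- stated objective: simpler
-- what changed: Replaces the counting loop and the subtracting while-loop with three str.count calls and the closed form min(B, A//3, N//2).
import Mathlib
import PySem

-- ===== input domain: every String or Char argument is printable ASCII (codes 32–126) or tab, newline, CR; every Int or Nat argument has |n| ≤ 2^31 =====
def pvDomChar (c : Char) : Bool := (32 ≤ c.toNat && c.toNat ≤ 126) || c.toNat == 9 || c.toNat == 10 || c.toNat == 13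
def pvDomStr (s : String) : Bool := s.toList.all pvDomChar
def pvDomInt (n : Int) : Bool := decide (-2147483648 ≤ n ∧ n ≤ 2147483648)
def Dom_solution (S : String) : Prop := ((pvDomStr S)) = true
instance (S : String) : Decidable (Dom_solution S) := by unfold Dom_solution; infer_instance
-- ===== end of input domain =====

-- B replaces A's counting loop and subtracting while-loop by three str.count calls and the closed form min(B, A//3, N//2); objective: simpler.


-- ===== PORT A =====
-- the while loop: while B >= 1 and A >= 3 and N >= 2: B -= 1; A -= 3; N -= 2; counter += 1
def banLoop (B A N counter : Int) : Int :=
  if h : B ≥ 1 ∧ A ≥ 3 ∧ N ≥ 2 then banLoop (B - 1) (A - 3) (N - 2) (counter + 1)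
  else counter
termination_by B.toNat
decreasing_by omega

def solution (S : String) : Int :=
  let st := S.toList.foldl (fun (st : Int × Int × Int) char =>
      let A := st.1; let B := st.2.1; let N := st.2.2
      let B := if char == 'B' then B + 1 else B
      let A := if char == 'A' then A + 1 else A
      let N := if char == 'N' then N + 1 else N
      (A, B, N)) (0, 0, 0)
  banLoop st.2.1 st.1 st.2.2 0

-- ===== PORT B =====
def solution_alt (S : String) : Int :=
  min ((PySem.Str.count S "B" : Int))
    (min (PySem.Int.floordiv (PySem.Str.count S "A" : Int) 3)
         (PySem.Int.floordiv (PySem.Str.count S "N" : Int) 2))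

-- ===== PRECONDITION & SPEC =====
def Spec_solution (S : String) (out : Int) : Prop := out = solution_alt S
instance (S : String) (out : Int) : Decidable (Spec_solution S out) := by unfold Spec_solution; infer_instance

-- ===== CLAIM (what is proved, stated in full; the proofs are below) =====
def Claim_equal_solution : Prop := ∀ (S : String), Dom_solution S → Spec_solution S (solution S)

-- ===== LEMMAS AND PROOFS =====

-- Str.count with a single-character needle counts occurrences of that character.
theorem count_go_single (c : Char) (l : List Char) (fuel acc : Nat) (h : l.length ≤ fuel) :
    PySem.Chars.count.go [c] fuel l acc = acc + l.count c := by
  induction l generalizing fuel acc with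
  | nil => cases fuel <;> simp [PySem.Chars.count.go]
  | cons x t ih =>
    cases fuel with
    | zero => simp at h
    | succ f =>
      have hstep : PySem.Chars.count.go [c] (f + 1) (x :: t) acc
          = if [c].isPrefixOf (x :: t) then
              PySem.Chars.count.go [c] f (List.drop [c].length (x :: t)) (acc + 1)
            else PySem.Chars.count.go [c] f t acc := rfl
      rw [hstep]
      by_cases hx : c = x
      · subst hx
        rw [if_pos (by simp [List.isPrefixOf])]
        simp only [List.length_cons, List.length_nil, Nat.zero_add, List.drop_one, List.tail_cons]
        rw [ih f (acc + 1) (by simpa using h)]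
        simp
        omega
      · rw [if_neg (by simp [List.isPrefixOf, hx])]
        rw [ih f acc (by simpa using h)]
        simp [Ne.symm hx]

theorem str_count_single (S : String) (c : Char) :
    PySem.Str.count S (String.ofList [c]) = S.toList.count c := by
  rw [PySem.Str.count_eq]
  have h : (String.ofList [c]).toList = [c] := by simp
  rw [h]
  unfold PySem.Chars.count
  rw [if_neg (by simp)]
  rw [count_go_single c S.toList S.toList.length 0 le_rfl]
  simp

-- the counting loop of A computes the three character counts
theorem foldl_abn (l : List Char) (a b n : Int) :
    l.foldl (fun (st : Int × Int × Int) char =>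
      let A := st.1; let B := st.2.1; let N := st.2.2
      let B := if char == 'B' then B + 1 else B
      let A := if char == 'A' then A + 1 else A
      let N := if char == 'N' then N + 1 else N
      (A, B, N)) (a, b, n)
    = (a + l.count 'A', b + l.count 'B', n + l.count 'N') := by
  induction l generalizing a b n with
  | nil => simp
  | cons x t ih =>
    simp only [List.foldl_cons, List.count_cons, ih]
    by_cases hB : x = 'B' <;> by_cases hA : x = 'A' <;> by_cases hN : x = 'N' <;>
      simp_all [Prod.ext_iff] <;> omega

-- the while loop computes the closed form
theorem banLoop_eq (B A N counter : Int) (hB : 0 ≤ B) (hA : 0 ≤ A) (hN : 0 ≤ N) :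
    banLoop B A N counter
      = counter + min B (min (PySem.Int.floordiv A 3) (PySem.Int.floordiv N 2)) := by
  rw [PySem.Int.floordiv_eq_ediv_of_pos (by omega), PySem.Int.floordiv_eq_ediv_of_pos (by omega)]
  have hb3 : (0:Int) < 3 := by omega
  have hb2 : (0:Int) < 2 := by omega
  induction hn : B.toNat generalizing B A N counter with
  | zero =>
    rw [banLoop]
    have hB0 : B = 0 := by omega
    have h1 : A / 3 ≥ 0 := Int.ediv_nonneg hA (by omega)
    have h2 : N / 2 ≥ 0 := Int.ediv_nonneg hN (by omega)
    simp [hB0]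
    omega
  | succ k ih =>
    rw [banLoop]
    by_cases h : B ≥ 1 ∧ A ≥ 3 ∧ N ≥ 2
    · rw [dif_pos h]
      rw [ih (B - 1) (A - 3) (N - 2) (counter + 1) (by omega) (by omega) (by omega) (by omega)]
      have e3 : (A - 3) / 3 = A / 3 - 1 := by omega
      have e2 : (N - 2) / 2 = N / 2 - 1 := by omega
      have h3 : 1 ≤ A / 3 := by omega
      have h2 : 1 ≤ N / 2 := by omega
      rw [e3, e2]
      omega
    · rw [dif_neg h]
      have h1 : 0 ≤ A / 3 := Int.ediv_nonneg hA (by omega)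
      have h2 : 0 ≤ N / 2 := Int.ediv_nonneg hN (by omega)
      have : A < 3 ∨ N < 2 ∨ B < 1 := by omega
      rcases this with h' | h' | h'
      · have : A / 3 = 0 := by omega
        omega
      · have : N / 2 = 0 := by omega
        omega
      · omega

-- ===== VERDICT (by name: the statement is the Claim_ definition above) =====
theorem solution_spec : Claim_equal_solution := by
  intro S _
  unfold Spec_solution solution solution_alt
  have hB : "B" = String.ofList ['B'] := rfl
  have hA : "A" = String.ofList ['A'] := rfl
  have hN : "N" = String.ofList ['N'] := rfl
  rw [hB, hA, hN, str_count_single, str_count_single, str_count_single]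
  simp only [foldl_abn]
  rw [banLoop_eq _ _ _ _ (by positivity) (by positivity) (by positivity)]
  simp
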